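-- pv_equiv track=rewrite | github.com/tjdud22/algorithm_ | 프로그래머스/0/120876. 겹치는 선분의 길이/겹치는 선분의 길이.py | solution
-- ===== SOURCE A (Python) =====
-- def solution(lines):
--     answer = 0
--     arr = [0]*201
--
--     for start,end in lines:
--         for i in range(start,end):
--             arr[i+100] +=1
--
--     for i in arr:
--         if i >=2:
--             answer+=1
--     return answer
-- ===== SOURCE B (Python) =====
-- def solution(lines):
--     # Difference array + prefix-sum sweep instead of per-unit filling.
--     diff = [0] * 202
--     for s, e in lines:
--         if s < e:
--             diff[s + 100] += 1
--             diff[e + 100] -= 1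
--     ans = 0
--     cur = 0
--     for d in diff[:201]:
--         cur += d
--         if cur >= 2:
--             ans += 1
--     return ans
-- ===== Notes on version B (the rewrite author's own statement) =====
-- stated objective: faster
-- what changed: Replaces the per-unit nested fill (one increment per covered unit per segment) with endpoint marking in a difference array and a single prefix-sum sweep that counts cells with running coverage >= 2.
-- outside the precondition, e.g. on solution([(-101, -100), (100, 101)]): A returns 1, B returns 0
import Mathlib
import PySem

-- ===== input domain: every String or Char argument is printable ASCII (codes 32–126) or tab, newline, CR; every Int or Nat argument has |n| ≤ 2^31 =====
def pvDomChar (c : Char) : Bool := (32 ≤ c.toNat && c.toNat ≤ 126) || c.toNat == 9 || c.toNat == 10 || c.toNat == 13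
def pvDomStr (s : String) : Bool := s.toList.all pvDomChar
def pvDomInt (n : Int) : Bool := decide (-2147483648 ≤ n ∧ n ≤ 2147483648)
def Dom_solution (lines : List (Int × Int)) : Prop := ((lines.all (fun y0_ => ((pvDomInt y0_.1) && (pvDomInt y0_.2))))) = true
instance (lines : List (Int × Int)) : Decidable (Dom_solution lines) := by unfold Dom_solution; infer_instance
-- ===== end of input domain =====

-- B replaces A's per-unit nested fill with a 202-cell difference array (endpoint marking) and one prefix-sum sweep.

-- ===== PORT A =====
def solution (lines : List (Int × Int)) : Int :=
  let arr : List Int := List.replicate 201 0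
  let arr := lines.foldl (fun arr se =>
    (PySem.List.pyRange se.1 se.2 1).foldl
      (fun a i => PySem.List.pySetD a (i + 100) (PySem.List.pyGetD a (i + 100) 0 + 1)) arr) arr
  arr.foldl (fun answer i => if i ≥ 2 then answer + 1 else answer) 0

-- ===== PORT B =====
def solution_alt (lines : List (Int × Int)) : Int :=
  let diff : List Int := List.replicate 202 0
  let diff := lines.foldl (fun d se =>
    if se.1 < se.2 then
      let d1 := PySem.List.pySetD d (se.1 + 100) (PySem.List.pyGetD d (se.1 + 100) 0 + 1)
      PySem.List.pySetD d1 (se.2 + 100) (PySem.List.pyGetD d1 (se.2 + 100) 0 - 1)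
    else d) diff
  ((PySem.List.slice diff none (some 201)).foldl
    (fun p x => (p.1 + x, if p.1 + x ≥ 2 then p.2 + 1 else p.2)) ((0 : Int), (0 : Int))).2

-- ===== PRECONDITION & SPEC =====
-- Pre_ keeps each nonempty segment inside the coordinate band A's 201-cell array indexes
-- directly (the problem's stated range): outside it A raises IndexError, except on a narrow
-- negative band (nonempty segments with start ≤ -101) where A returns a value only through
-- Python negative-index wraparound into the top of its array, an accident of A's fixed-size
-- array; empty segments (end ≤ start) are unrestricted since A ignores them.
def Pre_solution (lines : List (Int × Int)) : Prop :=
  ∀ se ∈ lines, se.2 ≤ se.1 ∨ (-100 ≤ se.1 ∧ se.2 ≤ 101)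
instance (lines : List (Int × Int)) : Decidable (Pre_solution lines) := by
  unfold Pre_solution; infer_instance
def pvWitness_solution : (List (Int × Int)) := [(0, 2), (1, 3)]
def Spec_solution (lines : List (Int × Int)) (out : Int) : Prop := out = solution_alt lines
instance (lines : List (Int × Int)) (out : Int) : Decidable (Spec_solution lines out) := by
  unfold Spec_solution; infer_instance

-- ===== CLAIM (what is proved, stated in full; the proofs are below) =====
def Claim_equal_solution : Prop := ∀ (lines : List (Int × Int)), Dom_solution lines → Pre_solution lines → Spec_solution lines (solution lines)

-- ===== LEMMAS AND PROOFS =====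

lemma pv_getD_set (a : List Int) (m k : Nat) (v : Int) (hm : m < a.length) :
    (a.set m v).getD k 0 = if k = m then v else a.getD k 0 := by
  simp only [List.getD, List.getElem?_set]
  by_cases h1 : m = k
  · subst h1; simp [hm]
  · simp [h1, Ne.symm h1]

lemma pv_sum_take_set (a : List Int) (m : Nat) (v : Int) (n : Nat) (hm : m < a.length) :
    ((a.set m v).take n).sum = (a.take n).sum + (if m < n then v - a.getD m 0 else 0) := by
  induction a generalizing m n with
  | nil => simp at hm
  | cons h t ih =>
    cases m with
    | zero =>
      cases n with
      | zero => simp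
      | succ n => simp [List.getD]; ring
    | succ m =>
      cases n with
      | zero => simp
      | succ n =>
        simp only [List.set, List.take, List.sum_cons, List.getD_cons_succ]
        rw [ih m n (by simpa using hm)]
        rcases Nat.lt_or_ge m n with h1 | h1
        · rw [if_pos h1, if_pos (by omega)]; ring
        · rw [if_neg (by omega), if_neg (by omega)]; ring

lemma pv_sum_take_update (a : List Int) (m : Nat) (c : Int) (n : Nat) (hm : m < a.length) :
    ((a.set m (a.getD m 0 + c)).take n).sum = (a.take n).sum + (if m < n then c else 0) := by
  rw [pv_sum_take_set a m _ n hm]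
  split_ifs <;> ring

lemma pv_diff_step (d : List Int) (s e : Int) (hlen : d.length = 202)
    (hse : s < e) (hs : -100 ≤ s) (he : e ≤ 101) (n : Nat) :
    ((PySem.List.pySetD (PySem.List.pySetD d (s + 100) (PySem.List.pyGetD d (s + 100) 0 + 1))
        (e + 100) (PySem.List.pyGetD (PySem.List.pySetD d (s + 100) (PySem.List.pyGetD d (s + 100) 0 + 1)) (e + 100) 0 - 1)).take n).sum
      = (d.take n).sum + (if (s + 100).toNat < n then 1 else 0) + (if (e + 100).toNat < n then -1 else 0) ∧
    (PySem.List.pySetD (PySem.List.pySetD d (s + 100) (PySem.List.pyGetD d (s + 100) 0 + 1))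
        (e + 100) (PySem.List.pyGetD (PySem.List.pySetD d (s + 100) (PySem.List.pyGetD d (s + 100) 0 + 1)) (e + 100) 0 - 1)).length = 202 := by
  have h0s : (0:Int) ≤ s + 100 := by omega
  have h0e : (0:Int) ≤ e + 100 := by omega
  have h1s : s + 100 < (d.length : Int) := by omega
  have hd1 : PySem.List.pySetD d (s + 100) (PySem.List.pyGetD d (s + 100) 0 + 1)
      = d.set (s + 100).toNat (d.getD (s + 100).toNat 0 + 1) := by
    rw [PySem.List.pySetD_of_nonneg d _ h0s, PySem.List.pyGetD_eq_getElem d 0 h0s h1s,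
      List.getD_eq_getElem d 0 (by omega)]
  rw [hd1]
  set d1 : List Int := d.set (s + 100).toNat (d.getD (s + 100).toNat 0 + 1) with hd1def
  have hlen1 : d1.length = 202 := by simp [hd1def, hlen]
  have h1e : e + 100 < (d1.length : Int) := by omega
  have hd2 : PySem.List.pySetD d1 (e + 100) (PySem.List.pyGetD d1 (e + 100) 0 - 1)
      = d1.set (e + 100).toNat (d1.getD (e + 100).toNat 0 + (-1)) := by
    rw [PySem.List.pySetD_of_nonneg d1 _ h0e, PySem.List.pyGetD_eq_getElem d1 0 h0e h1e,
      List.getD_eq_getElem d1 0 (by omega), sub_eq_add_neg]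
  rw [hd2]
  constructor
  · rw [pv_sum_take_update d1 _ _ n (by omega), hd1def,
      pv_sum_take_update d _ _ n (by omega)]
  · simp [hlen1]

lemma pv_fill_spec : ∀ (n : Nat) (s e : Int) (a : List Int), (e - s).toNat = n →
    a.length = 201 → -100 ≤ s → e ≤ 101 →
    ((PySem.List.pyRange s e 1).foldl
      (fun a i => PySem.List.pySetD a (i + 100) (PySem.List.pyGetD a (i + 100) 0 + 1)) a).length = 201 ∧
    ∀ k : Nat, k < 201 →
      ((PySem.List.pyRange s e 1).foldl
        (fun a i => PySem.List.pySetD a (i + 100) (PySem.List.pyGetD a (i + 100) 0 + 1)) a).getD k 0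
        = a.getD k 0 + (if s ≤ (k : Int) - 100 ∧ (k : Int) - 100 < e then 1 else 0) := by
  intro n
  induction n with
  | zero =>
    intro s e a hn hlen hs he
    rw [PySem.List.pyRange_one_eq_nil (by omega)]
    refine ⟨hlen, ?_⟩
    intro k hk
    rw [if_neg (by omega)]
    simp
  | succ n ih =>
    intro s e a hn hlen hs he
    have hse : s < e := by omega
    rw [PySem.List.pyRange_one_cons hse]
    simp only [List.foldl_cons]
    have h0 : (0:Int) ≤ s + 100 := by omega
    have h1 : s + 100 < (a.length : Int) := by omega
    have htn : ((s + 100).toNat : Int) = s + 100 := Int.toNat_of_nonneg h0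
    have hstep : (PySem.List.pySetD a (s + 100) (PySem.List.pyGetD a (s + 100) 0 + 1))
        = a.set (s + 100).toNat (a.getD (s + 100).toNat 0 + 1) := by
      rw [PySem.List.pySetD_of_nonneg a _ h0, PySem.List.pyGetD_eq_getElem a 0 h0 h1,
        List.getD_eq_getElem a 0 (by omega)]
    rw [hstep]
    have hlen' : (a.set (s + 100).toNat (a.getD (s + 100).toNat 0 + 1)).length = 201 := by
      simpa using hlen
    obtain ⟨ihl, ihg⟩ := ih (s + 1) e _ (by omega) hlen' (by omega) he
    refine ⟨ihl, ?_⟩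
    intro k hk
    rw [ihg k hk, pv_getD_set _ _ _ _ (by omega)]
    by_cases hks : k = (s + 100).toNat
    · subst hks
      rw [if_pos rfl, if_neg (by omega), if_pos (by constructor <;> omega)]
      ring
    · have hki : (k : Int) ≠ s + 100 := by omega
      rw [if_neg hks]
      by_cases hc : s + 1 ≤ (k : Int) - 100 ∧ (k : Int) - 100 < e
      · rw [if_pos hc, if_pos (by omega)]
      · rw [if_neg hc, if_neg (by omega)]

lemma pv_main_inv : ∀ (lines : List (Int × Int)),
    (∀ se ∈ lines, se.2 ≤ se.1 ∨ (-100 ≤ se.1 ∧ se.2 ≤ 101)) →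
    ∀ (arr diff : List Int), arr.length = 201 → diff.length = 202 →
    (∀ k : Nat, k < 201 → arr.getD k 0 = ((diff.take (k + 1)).sum)) →
    (lines.foldl (fun arr se =>
      (PySem.List.pyRange se.1 se.2 1).foldl
        (fun a i => PySem.List.pySetD a (i + 100) (PySem.List.pyGetD a (i + 100) 0 + 1)) arr) arr).length = 201 ∧
    (lines.foldl (fun d se =>
      if se.1 < se.2 then
        PySem.List.pySetD (PySem.List.pySetD d (se.1 + 100) (PySem.List.pyGetD d (se.1 + 100) 0 + 1))
          (se.2 + 100) (PySem.List.pyGetD (PySem.List.pySetD d (se.1 + 100) (PySem.List.pyGetD d (se.1 + 100) 0 + 1)) (se.2 + 100) 0 - 1)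
      else d) diff).length = 202 ∧
    (∀ k : Nat, k < 201 →
      (lines.foldl (fun arr se =>
        (PySem.List.pyRange se.1 se.2 1).foldl
          (fun a i => PySem.List.pySetD a (i + 100) (PySem.List.pyGetD a (i + 100) 0 + 1)) arr) arr).getD k 0
      = (((lines.foldl (fun d se =>
          if se.1 < se.2 then
            PySem.List.pySetD (PySem.List.pySetD d (se.1 + 100) (PySem.List.pyGetD d (se.1 + 100) 0 + 1))
              (se.2 + 100) (PySem.List.pyGetD (PySem.List.pySetD d (se.1 + 100) (PySem.List.pyGetD d (se.1 + 100) 0 + 1)) (se.2 + 100) 0 - 1)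
          else d) diff).take (k + 1)).sum)) := by
  intro lines
  induction lines with
  | nil =>
    intro _ arr diff hA hB hrel
    exact ⟨hA, hB, hrel⟩
  | cons se rest ih =>
    intro hpre arr diff hA hB hrel
    obtain ⟨s, e⟩ := se
    simp only [List.foldl_cons]
    by_cases hse : s < e
    · have hbounds : -100 ≤ s ∧ e ≤ 101 := by
        rcases hpre (s, e) (by simp) with h | h
        · exfalso; omega
        · exact h
      obtain ⟨hs, he⟩ := hbounds
      rw [if_pos hse]
      obtain ⟨hfl, hfg⟩ := pv_fill_spec (e - s).toNat s e arr rfl hA hs he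
      have hdiff := fun n => pv_diff_step diff s e hB hse hs he n
      refine ih (fun x hx => hpre x (by simp [hx])) _ _ hfl ((hdiff 0).2) ?_
      intro k hk
      rw [hfg k hk, (hdiff (k + 1)).1, hrel k hk]
      have htns : ((s + 100).toNat : Int) = s + 100 := Int.toNat_of_nonneg (by omega)
      have htne : ((e + 100).toNat : Int) = e + 100 := Int.toNat_of_nonneg (by omega)
      by_cases hc1 : (s + 100).toNat < k + 1
      · by_cases hc2 : (e + 100).toNat < k + 1
        · rw [if_pos hc1, if_pos hc2, if_neg (by omega)]; ring
        · rw [if_pos hc1, if_neg hc2, if_pos (by constructor <;> omega)]; ring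
      · have hc2 : ¬ (e + 100).toNat < k + 1 := by omega
        rw [if_neg hc1, if_neg hc2, if_neg (by omega)]; ring
    · rw [if_neg hse, PySem.List.pyRange_one_eq_nil (by omega), List.foldl_nil]
      exact ih (fun x hx => hpre x (by simp [hx])) _ _ hA hB hrel

lemma pv_sweep : ∀ (d arr : List Int) (c0 ans : Int), arr.length = d.length →
    (∀ k : Nat, k < d.length → arr.getD k 0 = c0 + (d.take (k + 1)).sum) →
    (d.foldl (fun p x => (p.1 + x, if p.1 + x ≥ 2 then p.2 + 1 else p.2)) (c0, ans)).2
      = arr.foldl (fun answer i => if i ≥ 2 then answer + 1 else answer) ans := by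
  intro d
  induction d with
  | nil =>
    intro arr c0 ans hlen _
    cases arr with
    | nil => simp
    | cons y t => simp at hlen
  | cons x d ih =>
    intro arr c0 ans hlen hrel
    cases arr with
    | nil => simp at hlen
    | cons y arr' =>
      have hy : y = c0 + x := by
        have := hrel 0 (by simp)
        simpa [List.getD] using this
      simp only [List.foldl_cons]
      rw [ih arr' (c0 + x) _ (by simpa using hlen) ?rel]
      · rw [hy]
      case rel =>
        intro k hk
        have := hrel (k + 1) (by simpa using Nat.succ_lt_succ hk)
        simpa [List.getD, add_assoc] using this

-- ===== VERDICT (by name: the statement is the Claim_ definition above) =====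
theorem solution_spec : Claim_equal_solution := by
  intro lines _hdom hpre
  unfold Spec_solution
  simp only [solution, solution_alt]
  obtain ⟨hlenA, hlenB, hrel⟩ := pv_main_inv lines hpre (List.replicate 201 (0:Int)) (List.replicate 202 (0:Int))
    (by rw [List.length_replicate]) (by rw [List.length_replicate])
    (by
      intro k hk
      rw [List.getD_replicate, List.take_replicate, List.sum_replicate, smul_zero]
      exact hk)
  set arrF : List Int := lines.foldl (fun arr se =>
      (PySem.List.pyRange se.1 se.2 1).foldl
        (fun a i => PySem.List.pySetD a (i + 100) (PySem.List.pyGetD a (i + 100) 0 + 1)) arr)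
      (List.replicate 201 (0:Int)) with harr
  set diffF : List Int := lines.foldl (fun d se =>
      if se.1 < se.2 then
        PySem.List.pySetD (PySem.List.pySetD d (se.1 + 100) (PySem.List.pyGetD d (se.1 + 100) 0 + 1))
          (se.2 + 100) (PySem.List.pyGetD (PySem.List.pySetD d (se.1 + 100) (PySem.List.pyGetD d (se.1 + 100) 0 + 1)) (se.2 + 100) 0 - 1)
      else d) (List.replicate 202 (0:Int)) with hdiff
  have hslice : PySem.List.slice diffF none (some 201) = diffF.take 201 := by
    simpa using PySem.List.slice_to_natCast diffF 201
  rw [hslice]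
  rw [← pv_sweep (diffF.take 201) arrF 0 0
    (by rw [List.length_take, hlenB, hlenA]; omega)
    (by
      intro k hk
      rw [List.length_take, hlenB] at hk
      rw [List.take_take, min_eq_left (by omega), hrel k (by omega), zero_add])]
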